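-- pv_equiv track=rewrite | github.com/KertAles/Sensors_Topology | utils.py | get_collapsibles
-- ===== SOURCE A (Python) =====
-- from itertools import chain, combinations
--
-- def get_collapsibles(S, progress) :
--     collapsible = []
--
--     for sx1 in S :
--         i = len(sx1) - 1
--         faces = []
--
--         while i > 0 :
--
--             for comb in combinations(sx1, i) :
--                 is_face = True
--                 for sx2 in S:
--                     if sx1 != sx2 and set(comb).issubset(set(sx2)) :
--                         is_face = False
--                         break
--                 if is_face :
--                     faces.append(comb)
--
--             if len(faces) > 0 :
--                 break
--
--             i = i - 1
--         for face in faces :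
--             collapsible.append([sx1, face])
--
--     return collapsible
-- ===== SOURCE B (Python) =====
-- from itertools import combinations
--
-- def get_collapsibles(S, progress):
--     # Phase 1: inverted index vertex -> set of distinct simplices containing it.
--     inv = {}
--     for sx2 in S:
--         t2 = tuple(sx2)
--         for x in sx2:
--             inv.setdefault(x, set()).add(t2)
--     # Phase 2: a comb is a free face iff the intersection of the posting sets of
--     # its vertices (= the simplices containing comb) holds only this simplex.
--     collapsible = []
--     for sx1 in S:
--         for i in range(len(sx1) - 1, 0, -1):
--             faces = [comb for comb in combinations(sx1, i)
--                      if len(set.intersection(*(inv[x] for x in set(comb)))) == 1]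
--             if faces:
--                 collapsible.extend([sx1, face] for face in faces)
--                 break
--     return collapsible
-- ===== Notes on version B (the rewrite author's own statement) =====
-- stated objective: faster
-- what changed: B first builds an inverted index from each vertex to the set of distinct simplices containing it, then decides each candidate free face by intersecting the posting sets of its vertices, instead of A's Python-level rescan of the whole complex S with a subset test for every candidate combination.
import Mathlib
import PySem

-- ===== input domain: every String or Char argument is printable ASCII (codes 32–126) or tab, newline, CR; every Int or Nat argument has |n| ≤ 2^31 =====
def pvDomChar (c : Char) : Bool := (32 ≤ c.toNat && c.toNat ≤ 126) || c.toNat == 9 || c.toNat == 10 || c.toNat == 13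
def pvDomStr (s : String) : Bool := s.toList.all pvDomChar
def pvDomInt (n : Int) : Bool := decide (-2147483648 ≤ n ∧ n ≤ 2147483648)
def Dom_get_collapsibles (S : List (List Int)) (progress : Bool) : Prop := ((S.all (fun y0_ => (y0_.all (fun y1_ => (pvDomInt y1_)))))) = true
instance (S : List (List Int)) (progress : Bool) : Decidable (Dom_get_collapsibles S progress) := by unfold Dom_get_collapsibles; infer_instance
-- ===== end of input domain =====

-- B replaces A's rescan of the whole complex S per candidate combination by an inverted
-- index (vertex -> set of simplices containing it) built once, deciding each candidate
-- by intersecting the posting sets of its vertices; objective: faster.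

-- itertools.combinations(l, i) in Python's emission order (shared helper: both Pythons call it)
def pvCombos (l : List Int) (i : Nat) : List (List Int) :=
  match i, l with
  | 0, _ => [[]]
  | _ + 1, [] => []
  | i + 1, x :: xs => (pvCombos xs i).map (fun c => x :: c) ++ pvCombos xs (i + 1)
termination_by l.length

-- ===== PORT A =====
-- inner 'for sx2 in S' loop with break, computing is_face
def pvIsFace (sxs : List (List Int)) (sx1 comb : List Int) : Bool :=
  match sxs with
  | [] => true
  | sx2 :: rest =>
      if decide (sx1 ≠ sx2) && PySem.Set.issubset (PySem.Set.ofList comb) (PySem.Set.ofList sx2) then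
        false
      else pvIsFace rest sx1 comb

-- one pass of 'for comb in combinations(sx1, i)' appending free faces
def pvPass (S : List (List Int)) (sx1 : List Int) (i : Nat) (faces : List (List Int)) : List (List Int) :=
  (pvCombos sx1 i).foldl (fun fs comb => if pvIsFace S sx1 comb then fs ++ [comb] else fs) faces

-- the 'while i > 0' loop (i = len(sx1)-1 at entry; breaks when faces is nonempty)
def pvWhile (S : List (List Int)) (sx1 : List Int) : Nat → List (List Int) → List (List Int)
  | 0, faces => faces
  | i + 1, faces =>
      let fs := pvPass S sx1 (i + 1) faces
      if fs.length > 0 then fs else pvWhile S sx1 i fs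

def get_collapsibles (S : List (List Int)) (progress : Bool) : List (List (List Int)) :=
  S.foldl (fun collapsible sx1 =>
    (pvWhile S sx1 (sx1.length - 1) []).foldl (fun c face => c ++ [[sx1, face]]) collapsible) []

-- ===== PORT B =====
-- phase 1: inv[x] = set of simplices containing vertex x (inv.setdefault(x, set()).add(t2))
def pvInv (S : List (List Int)) : PySem.Dict Int (PySem.Set (List Int)) :=
  S.foldl (fun d sx2 =>
    sx2.foldl (fun d x => d.insert x (PySem.Set.add (d.getD x []) sx2)) d) PySem.Dict.empty

-- set.intersection(*(inv[x] for x in set(comb))): only its SIZE is consumed below, which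
-- does not depend on the Python set iteration order, so folding in set(comb)'s build order is exact
def pvCand (inv : PySem.Dict Int (PySem.Set (List Int))) (comb : List Int) :
    PySem.Set (List Int) :=
  match PySem.Set.ofList comb with
  | [] => []
  | x :: rest => rest.foldl (fun c y => PySem.Set.inter c (inv.getD y [])) (inv.getD x [])

-- phase 2 inner loop: 'for i in range(len(sx1)-1, 0, -1)' with break on first nonempty faces
def pvBLoop (inv : PySem.Dict Int (PySem.Set (List Int))) (sx1 : List Int) :
    List Int → List (List (List Int))
  | [] => []
  | i :: rest =>
      let faces := (pvCombos sx1 i.toNat).filter (fun c => (pvCand inv c).length == 1)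
      if faces = [] then pvBLoop inv sx1 rest else faces.map (fun f => [sx1, f])

def get_collapsibles_alt (S : List (List Int)) (progress : Bool) : List (List (List Int)) :=
  let inv := pvInv S
  S.foldl (fun collapsible sx1 =>
    collapsible ++ pvBLoop inv sx1 (PySem.List.pyRange ((sx1.length : Int) - 1) 0 (-1))) []

-- ===== PRECONDITION & SPEC =====
def Spec_get_collapsibles (S : List (List Int)) (progress : Bool) (out : List (List (List Int))) : Prop := out = get_collapsibles_alt S progress
instance (S : List (List Int)) (progress : Bool) (out : List (List (List Int))) : Decidable (Spec_get_collapsibles S progress out) := by unfold Spec_get_collapsibles; infer_instance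

-- ===== CLAIM (what is proved, stated in full; the proofs are below) =====
def Claim_equal_get_collapsibles : Prop := ∀ (S : List (List Int)) (progress : Bool), Dom_get_collapsibles S progress → Spec_get_collapsibles S progress (get_collapsibles S progress)

-- ===== LEMMAS AND PROOFS =====

theorem pv_mem_combos (l : List Int) (i : Nat) (c : List Int) :
    c ∈ pvCombos l i ↔ c.Sublist l ∧ c.length = i := by
  induction l generalizing i c with
  | nil =>
    cases i with
    | zero => simp [pvCombos, List.length_eq_zero_iff]
    | succ i =>
      simp only [pvCombos, List.not_mem_nil, false_iff]
      rintro ⟨hs, hl⟩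
      have := List.sublist_nil.mp hs
      subst this
      simp at hl
  | cons x xs ih =>
    cases i with
    | zero =>
      simp only [pvCombos, List.mem_singleton]
      constructor
      · rintro rfl; exact ⟨List.nil_sublist _, rfl⟩
      · rintro ⟨_, hl⟩; exact List.length_eq_zero_iff.mp hl
    | succ i =>
      simp only [pvCombos, List.mem_append, List.mem_map, ih]
      constructor
      · rintro (⟨c', ⟨hs, hl⟩, rfl⟩ | ⟨hs, hl⟩)
        · exact ⟨hs.cons₂ x, by simp [hl]⟩
        · exact ⟨hs.cons x, hl⟩
      · rintro ⟨hs, hl⟩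
        rcases List.sublist_cons_iff.mp hs with h | ⟨r, rfl, hr⟩
        · exact Or.inr ⟨h, hl⟩
        · exact Or.inl ⟨r, ⟨hr, by simpa using hl⟩, rfl⟩

theorem pv_isface_iff (S : List (List Int)) (sx1 c : List Int) :
    pvIsFace S sx1 c = true ↔ ∀ sx2 ∈ S, sx1 ≠ sx2 → ¬ (∀ x ∈ c, x ∈ sx2) := by
  induction S with
  | nil => simp [pvIsFace]
  | cons sx2 rest ih =>
    simp only [pvIsFace]
    split
    · rename_i h
      simp only [Bool.and_eq_true, decide_eq_true_eq, PySem.Set.issubset_iff,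
        PySem.Set.mem_ofList] at h
      simp only [Bool.false_eq_true, false_iff]
      intro hall
      exact (hall sx2 List.mem_cons_self h.1) (fun x hx => h.2 x hx)
    · rename_i h
      simp only [Bool.and_eq_true, decide_eq_true_eq, PySem.Set.issubset_iff,
        PySem.Set.mem_ofList, not_and] at h
      rw [ih]
      constructor
      · intro hall sx hx hne
        rcases List.mem_cons.mp hx with rfl | hx
        · intro hsub
          exact (h hne) fun x hxc => hsub x hxc
        · exact hall sx hx hne
      · intro hall sx hx hne
        exact hall sx (List.mem_cons_of_mem _ hx) hne

theorem pv_mem_foldl_insert {κ : Type} [BEq κ] [LawfulBEq κ] [DecidableEq κ]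
    (ks : List κ) (v : List Int)
    (d : PySem.Dict κ (PySem.Set (List Int))) (k₀ : κ) (w : List Int) :
    w ∈ ((ks.foldl (fun d k => d.insert k (PySem.Set.add (d.getD k []) v)) d).getD k₀ []) ↔
      w ∈ d.getD k₀ [] ∨ (w = v ∧ k₀ ∈ ks) := by
  induction ks generalizing d with
  | nil => simp
  | cons k ks ih =>
    simp only [List.foldl_cons, ih, PySem.Dict.getD_insert, List.mem_cons]
    by_cases hk : k₀ = k
    · subst hk
      simp [PySem.Set.mem_add]
      tauto
    · simp [hk]

theorem pv_nodup_foldl_insert {κ : Type} [BEq κ] [LawfulBEq κ] [DecidableEq κ]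
    (ks : List κ) (v : List Int)
    (d : PySem.Dict κ (PySem.Set (List Int)))
    (h : ∀ k, (d.getD k []).Nodup) (k₀ : κ) :
    ((ks.foldl (fun d k => d.insert k (PySem.Set.add (d.getD k []) v)) d).getD k₀ []).Nodup := by
  induction ks generalizing d with
  | nil => exact h k₀
  | cons k ks ih =>
    simp only [List.foldl_cons]
    apply ih
    intro k'
    rw [PySem.Dict.getD_insert]
    split
    · exact PySem.Set.nodup_add _ _ (h k)
    · exact h k'

theorem pv_mem_inv_aux (S : List (List Int)) (d : PySem.Dict Int (PySem.Set (List Int)))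
    (x : Int) (w : List Int) :
    w ∈ ((S.foldl (fun d sx2 =>
        sx2.foldl (fun d y => d.insert y (PySem.Set.add (d.getD y []) sx2)) d) d).getD x []) ↔
      w ∈ d.getD x [] ∨ ∃ sx2 ∈ S, w = sx2 ∧ x ∈ sx2 := by
  induction S generalizing d with
  | nil => simp
  | cons sx rest ih =>
    rw [List.foldl_cons, ih, pv_mem_foldl_insert]
    constructor
    · rintro ((h | ⟨heq, h⟩) | ⟨sx2, hs, heq, h⟩)
      · exact Or.inl h
      · exact Or.inr ⟨sx, List.mem_cons_self, heq, h⟩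
      · exact Or.inr ⟨sx2, List.mem_cons_of_mem _ hs, heq, h⟩
    · rintro (h | ⟨sx2, hs, heq, h⟩)
      · exact Or.inl (Or.inl h)
      · rcases List.mem_cons.mp hs with rfl | hs
        · exact Or.inl (Or.inr ⟨heq, h⟩)
        · exact Or.inr ⟨sx2, hs, heq, h⟩

theorem pv_mem_inv (S : List (List Int)) (x : Int) (w : List Int) :
    w ∈ (pvInv S).getD x [] ↔ w ∈ S ∧ x ∈ w := by
  unfold pvInv
  rw [pv_mem_inv_aux]
  simp only [PySem.Dict.getD_empty, List.not_mem_nil, false_or]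
  constructor
  · rintro ⟨sx2, hs, rfl, hx⟩; exact ⟨hs, hx⟩
  · rintro ⟨hs, hx⟩; exact ⟨w, hs, rfl, hx⟩

theorem pv_nodup_inv_aux (S : List (List Int)) (d : PySem.Dict Int (PySem.Set (List Int)))
    (h : ∀ k, (d.getD k []).Nodup) (x : Int) :
    ((S.foldl (fun d sx2 =>
        sx2.foldl (fun d y => d.insert y (PySem.Set.add (d.getD y []) sx2)) d) d).getD x []).Nodup := by
  induction S generalizing d with
  | nil => exact h x
  | cons sx rest ih =>
    rw [List.foldl_cons]
    apply ih
    intro k'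
    exact pv_nodup_foldl_insert sx sx d h k'

theorem pv_nodup_inv (S : List (List Int)) (x : Int) : ((pvInv S).getD x []).Nodup := by
  unfold pvInv
  exact pv_nodup_inv_aux S _ (by simp) x

theorem pv_mem_fold_inter (inv : PySem.Dict Int (PySem.Set (List Int)))
    (rest : List Int) (init : PySem.Set (List Int)) (w : List Int) :
    w ∈ rest.foldl (fun c y => PySem.Set.inter c (inv.getD y [])) init ↔
      w ∈ init ∧ ∀ y ∈ rest, w ∈ inv.getD y [] := by
  induction rest generalizing init with
  | nil => simp
  | cons y ys ih =>
    rw [List.foldl_cons, ih, PySem.Set.mem_inter]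
    simp only [List.mem_cons]
    constructor
    · rintro ⟨⟨h1, h2⟩, h3⟩
      exact ⟨h1, fun z hz => by rcases hz with rfl | hz; exact h2; exact h3 z hz⟩
    · rintro ⟨h1, h2⟩
      exact ⟨⟨h1, h2 y (Or.inl rfl)⟩, fun z hz => h2 z (Or.inr hz)⟩

theorem pv_mem_cand (S : List (List Int)) (c : List Int) (hc : c ≠ []) (w : List Int) :
    w ∈ pvCand (pvInv S) c ↔ w ∈ S ∧ ∀ x ∈ c, x ∈ w := by
  unfold pvCand
  cases h : PySem.Set.ofList c with
  | nil =>
    exfalso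
    obtain ⟨y, hy⟩ := List.exists_mem_of_ne_nil c hc
    have : y ∈ PySem.Set.ofList c := (PySem.Set.mem_ofList c y).mpr hy
    rw [h] at this
    simp at this
  | cons x rest =>
    rw [pv_mem_fold_inter]
    have hmem : ∀ y : Int, y ∈ c ↔ y = x ∨ y ∈ rest := by
      intro y
      rw [← List.mem_cons, ← h, PySem.Set.mem_ofList]
    constructor
    · rintro ⟨h1, h2⟩
      have hx := (pv_mem_inv S x w).mp h1
      refine ⟨hx.1, fun y hy => ?_⟩
      rcases (hmem y).mp hy with rfl | hy
      · exact hx.2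
      · exact ((pv_mem_inv S y w).mp (h2 y hy)).2
    · rintro ⟨h1, h2⟩
      constructor
      · exact (pv_mem_inv S x w).mpr ⟨h1, h2 x ((hmem x).mpr (Or.inl rfl))⟩
      · exact fun y hy => (pv_mem_inv S y w).mpr ⟨h1, h2 y ((hmem y).mpr (Or.inr hy))⟩

theorem pv_nodup_fold_inter (inv : PySem.Dict Int (PySem.Set (List Int)))
    (rest : List Int) (init : PySem.Set (List Int)) (h : init.Nodup) :
    (rest.foldl (fun c y => PySem.Set.inter c (inv.getD y [])) init).Nodup := by
  induction rest generalizing init with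
  | nil => simpa using h
  | cons y ys ih =>
    rw [List.foldl_cons]
    exact ih _ (PySem.Set.nodup_inter _ _ h)

theorem pv_nodup_cand (S : List (List Int)) (c : List Int) :
    (pvCand (pvInv S) c).Nodup := by
  unfold pvCand
  cases h : PySem.Set.ofList c with
  | nil => simp
  | cons x rest => exact pv_nodup_fold_inter _ rest _ (pv_nodup_inv S x)

theorem pv_count (S : List (List Int)) (sx1 c : List Int) (hS : sx1 ∈ S) (hc : c ≠ [])
    (hsub : ∀ x ∈ c, x ∈ sx1) :
    ((pvCand (pvInv S) c).length == 1) = pvIsFace S sx1 c := by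
  have hmemV : sx1 ∈ pvCand (pvInv S) c := (pv_mem_cand S c hc sx1).mpr ⟨hS, hsub⟩
  have hnd := pv_nodup_cand S c
  rw [Bool.eq_iff_iff]
  simp only [beq_iff_eq, pv_isface_iff]
  constructor
  · intro h1 sx2 hs2 hne hsubset
    have hmem2 : sx2 ∈ pvCand (pvInv S) c := (pv_mem_cand S c hc sx2).mpr ⟨hs2, hsubset⟩
    obtain ⟨a, ha⟩ := List.length_eq_one_iff.mp h1
    rw [ha] at hmemV hmem2
    simp only [List.mem_singleton] at hmemV hmem2
    exact hne (hmemV.trans hmem2.symm)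
  · intro h
    have hall : ∀ w ∈ pvCand (pvInv S) c, w = sx1 := by
      intro w hw
      obtain ⟨hws, hwsub⟩ := (pv_mem_cand S c hc w).mp hw
      by_contra hne
      exact h w hws (fun he => hne he.symm) hwsub
    generalize hgen : pvCand (pvInv S) c = V at hmemV hnd hall ⊢
    rcases V with _ | ⟨a, t⟩
    · simp at hmemV
    · rcases t with _ | ⟨b, t⟩
      · rfl
      · exfalso
        have ha := hall a List.mem_cons_self
        have hb := hall b (by simp)
        rw [List.nodup_cons] at hnd
        exact hnd.1 (by rw [ha, hb]; exact List.mem_cons_self)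

theorem pv_loop (S : List (List Int)) (sx1 : List Int) (hS : sx1 ∈ S) (m : Nat) :
    pvBLoop (pvInv S) sx1 (PySem.List.pyRange (m : Int) 0 (-1)) =
      (pvWhile S sx1 m []).map (fun f => [sx1, f]) := by
  induction m with
  | zero => simp [PySem.List.pyRange_neg_one_eq_nil le_rfl, pvBLoop, pvWhile]
  | succ m ih =>
    have hcast : ((m + 1 : Nat) : Int) = (m : Int) + 1 := by push_cast; ring
    rw [hcast, PySem.List.pyRange_neg_one_cons (by positivity)]
    have hm1 : (m : Int) + 1 - 1 = (m : Int) := by ring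
    rw [hm1]
    simp only [pvBLoop]
    have htn : ((m : Int) + 1).toNat = m + 1 := by omega
    rw [htn]
    have hfaces : (pvCombos sx1 (m + 1)).filter
        (fun c => (pvCand (pvInv S) c).length == 1) =
        (pvCombos sx1 (m + 1)).filter (fun c => pvIsFace S sx1 c) := by
      apply List.filter_congr
      intro c hcmem
      obtain ⟨hs, hl⟩ := (pv_mem_combos _ _ _).mp hcmem
      exact pv_count S sx1 c hS (by intro hnil; subst hnil; simp at hl)
        (fun x hx => hs.subset hx)
    have hpass : pvPass S sx1 (m + 1) [] = (pvCombos sx1 (m + 1)).filter (fun c => pvIsFace S sx1 c) := by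
      unfold pvPass
      simpa using PySem.List.foldl_append_if (fun comb => pvIsFace S sx1 comb)
        (fun cc => cc) (pvCombos sx1 (m + 1)) []
    rw [hfaces]
    simp only [pvWhile, hpass]
    by_cases hF : (pvCombos sx1 (m + 1)).filter (fun c => pvIsFace S sx1 c) = []
    · rw [hF]
      simp only [List.length_nil, gt_iff_lt, lt_self_iff_false, if_false]
      exact ih
    · rw [if_neg hF, if_pos (List.length_pos_of_ne_nil hF)]

theorem pv_loop' (S : List (List Int)) (sx1 : List Int) (hS : sx1 ∈ S) :
    pvBLoop (pvInv S) sx1 (PySem.List.pyRange ((sx1.length : Int) - 1) 0 (-1)) =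
      (pvWhile S sx1 (sx1.length - 1) []).map (fun f => [sx1, f]) := by
  cases hn : sx1.length with
  | zero =>
    have h1 : ((0 : Nat) : Int) - 1 = -1 := by norm_num
    rw [h1, PySem.List.pyRange_neg_one_eq_nil (by norm_num)]
    simp [pvBLoop, pvWhile]
  | succ n =>
    have h1 : ((n + 1 : Nat) : Int) - 1 = (n : Int) := by push_cast; ring
    rw [h1]
    simpa using pv_loop S sx1 hS n

-- ===== VERDICT (by name: the statement is the Claim_ definition above) =====
theorem get_collapsibles_spec : Claim_equal_get_collapsibles := by
  intro S progress _
  unfold Spec_get_collapsibles get_collapsibles get_collapsibles_alt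
  apply PySem.List.foldl_congr_mem
  intro acc sx1 hmem
  rw [pv_loop' S sx1 hmem]
  simpa using PySem.List.foldl_append_singleton_eq_map (fun face => [sx1, face])
    (pvWhile S sx1 (sx1.length - 1) []) acc
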